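-- pv_equiv track=rewrite | github.com/galid1/Algorithm | python/baekjoon/2.algorithm/implementation/5555.반지.py | is_include
-- ===== SOURCE A (Python) =====
-- def is_include(ring, target):
--     for i in range(len(ring)):
--         include = True
--         for j, c in enumerate(target):
--             if ring[(i+j)%len(ring)] != c:
--                 include = False
--                 break
--
--         if include:
--             return True
--
--     return False
-- ===== SOURCE B (Python) =====
-- def is_include(ring, target):
--     if not ring:
--         return False
--     return target in ring * (len(target) // len(ring) + 2)
-- ===== Notes on version B (the rewrite author's own statement) =====
-- stated objective: faster
-- what changed: Replaces the explicit double loop over every rotation start with a single substring test of target in the ring repeated ceil-wise often enough to cover every wrap-around, using Python's built-in two-way substring search.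
import Mathlib
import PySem

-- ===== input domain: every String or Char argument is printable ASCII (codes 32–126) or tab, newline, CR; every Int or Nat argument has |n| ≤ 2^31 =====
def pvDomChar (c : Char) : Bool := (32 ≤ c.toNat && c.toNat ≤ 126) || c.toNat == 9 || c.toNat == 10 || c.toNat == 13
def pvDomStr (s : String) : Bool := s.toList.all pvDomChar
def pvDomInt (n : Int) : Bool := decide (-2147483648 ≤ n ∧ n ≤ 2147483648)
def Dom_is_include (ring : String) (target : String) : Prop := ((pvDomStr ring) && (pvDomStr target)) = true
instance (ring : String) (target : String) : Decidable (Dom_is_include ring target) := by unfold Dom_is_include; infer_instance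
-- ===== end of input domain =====

-- B replaces A's explicit O(n*m) double loop over rotation starts with a single substring
-- test of target inside the ring repeated often enough to cover every wrap-around (faster).


-- ===== PORT A =====
-- for i in range(len(ring)): the inner for-loop with the `include` flag and `break`
-- succeeds iff every enumerated (j, c) satisfies ring[(i+j) % len(ring)] == c, i.e. `.all`;
-- the outer loop with early `return True` is `.any`. The index (i+j) % len(ring) is always
-- in range (the loop body only runs when len(ring) > 0), so pyGetD's default is never used.
def is_include (ring : String) (target : String) : Bool :=
  let r := ring.toList
  (List.range r.length).any (fun i =>
    (PySem.List.enumerate target.toList).all (fun jc =>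
      PySem.List.pyGetD r (PySem.Int.mod ((i : Int) + jc.1) ((r.length : Int))) ' ' == jc.2))

-- ===== PORT B =====
-- if not ring: return False; return target in ring * (len(target) // len(ring) + 2)
def is_include_alt (ring : String) (target : String) : Bool :=
  let r := ring.toList
  let t := target.toList
  if r.isEmpty then false
  else PySem.Chars.isIn t
    (PySem.List.pyRepeat r (PySem.Int.floordiv (t.length : Int) (r.length : Int) + 2))

-- ===== PRECONDITION & SPEC =====
def Spec_is_include (ring : String) (target : String) (out : Bool) : Prop := out = is_include_alt ring target
instance (ring : String) (target : String) (out : Bool) : Decidable (Spec_is_include ring target out) := by unfold Spec_is_include; infer_instance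

-- ===== CLAIM (what is proved, stated in full; the proofs are below) =====
def Claim_equal_is_include : Prop := ∀ (ring : String) (target : String), Dom_is_include ring target → Spec_is_include ring target (is_include ring target)

-- ===== LEMMAS AND PROOFS =====

-- indexing into a k-fold repetition of r is indexing into r modulo its length
lemma pv_flatten_replicate_getElem? (r : List Char) (k p : Nat) (hp : p < k * r.length) :
    ((List.replicate k r).flatten)[p]? = r[p % r.length]? := by
  induction k generalizing p with
  | zero => simp at hp
  | succ k ih =>
    rw [Nat.succ_mul] at hp
    rw [List.replicate_succ, List.flatten_cons]
    by_cases h : p < r.length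
    · rw [List.getElem?_append_left h, Nat.mod_eq_of_lt h]
    · rw [Nat.not_lt] at h
      rw [List.getElem?_append_right h, ih (p - r.length) (by omega)]
      congr 1
      conv_rhs => rw [← Nat.sub_add_cancel h, Nat.add_mod_right]

-- pointwise characterisation of "t is a contiguous substring of big"
lemma pv_infix_char (t big : List Char) :
    t <:+: big ↔ ∃ p, p + t.length ≤ big.length ∧
      ∀ j < t.length, big[p + j]? = t[j]? := by
  constructor
  · rintro ⟨s, u, rfl⟩
    refine ⟨s.length, by simp, fun j hj => ?_⟩
    rw [show s ++ t ++ u = s ++ (t ++ u) by simp]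
    rw [List.getElem?_append_right (by omega), Nat.add_sub_cancel_left,
      List.getElem?_append_left hj]
  · rintro ⟨p, hle, hall⟩
    have ht : t = (big.drop p).take t.length := by
      apply List.ext_getElem?
      intro j
      by_cases hj : j < t.length
      · rw [List.getElem?_take, if_pos hj, List.getElem?_drop, hall j hj]
      · rw [List.getElem?_eq_none (by omega), List.getElem?_eq_none]
        simp
        omega
    rw [ht]
    exact ((big.drop p).take_prefix t.length).isInfix.trans (big.drop_suffix p).isInfix

-- the indexing expression of port A, evaluated: ring[(i+j) % len(ring)]
lemma pv_getD (r : List Char) (hn : 0 < r.length) (i k : Nat) :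
    PySem.List.pyGetD r (PySem.Int.mod ((i : Int) + (k : Int)) ((r.length : Int))) ' '
      = r[(i + k) % r.length]'(Nat.mod_lt _ hn) := by
  have hx : PySem.Int.mod ((i : Int) + (k : Int)) ((r.length : Int))
      = (((i + k) % r.length : Nat) : Int) := by
    rw [PySem.Int.mod_eq_emod_of_pos (by exact_mod_cast hn)]
    push_cast
    ring_nf
  rw [hx, PySem.List.pyGetD_natCast, List.getD_eq_getElem _ _ (Nat.mod_lt _ hn)]

-- A's rotation scan agrees with "t occurs in r repeated (len(t)/len(r) + 2) times" when r ≠ []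
lemma pv_main (r t : List Char) (hn : r ≠ []) :
    ((List.range r.length).any fun i =>
       (PySem.List.enumerate t).all fun jc =>
         PySem.List.pyGetD r (PySem.Int.mod ((i : Int) + jc.1) ((r.length : Int))) ' ' == jc.2)
    = PySem.Chars.isIn t ((List.replicate (t.length / r.length + 2) r).flatten) := by
  have hn' : 0 < r.length := List.length_pos_iff.mpr hn
  rw [Bool.eq_iff_iff, List.any_eq_true]
  rw [PySem.Chars.isIn_iff_infix, pv_infix_char]
  have hbig : ((List.replicate (t.length / r.length + 2) r).flatten).length
      = (t.length / r.length + 2) * r.length := by simp [Nat.mul_comm]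
  have hKn : t.length + r.length < (t.length / r.length + 2) * r.length := by
    have h1 := Nat.mod_add_div' t.length r.length
    have h2 := Nat.mod_lt t.length hn'
    have h3 : (t.length / r.length + 2) * r.length
        = t.length / r.length * r.length + 2 * r.length := by ring
    omega
  have hinner : ∀ i : Nat,
      (((PySem.List.enumerate t).all fun jc =>
          PySem.List.pyGetD r (PySem.Int.mod ((i : Int) + jc.1) ((r.length : Int))) ' ' == jc.2) = true
        ↔ ∀ k, k < t.length → r[(i + k) % r.length]? = t[k]?) := by
    intro i
    rw [List.all_eq_true]
    constructor
    · intro h k hk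
      have h2 := h ((0 : Int) + (k : Int), t[k]) ((PySem.List.mem_enumerate_iff t 0 _).mpr ⟨k, hk, rfl⟩)
      simp only [beq_iff_eq, zero_add] at h2
      rw [pv_getD r hn' i k] at h2
      rw [List.getElem?_eq_getElem (Nat.mod_lt _ hn'), List.getElem?_eq_getElem hk, Option.some_inj]
      exact h2
    · intro h jc hjc
      rw [PySem.List.mem_enumerate_iff] at hjc
      obtain ⟨k, hk, rfl⟩ := hjc
      have h2 := h k hk
      rw [List.getElem?_eq_getElem (Nat.mod_lt _ hn'), List.getElem?_eq_getElem hk,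
        Option.some_inj] at h2
      simpa [beq_iff_eq, pv_getD r hn' i k] using h2
  constructor
  · rintro ⟨i, hi, hall⟩
    rw [List.mem_range] at hi
    rw [hinner i] at hall
    refine ⟨i, by omega, fun j hj => ?_⟩
    rw [pv_flatten_replicate_getElem? r (t.length / r.length + 2) (i + j) (by omega)]
    exact hall j hj
  · rintro ⟨p, hple, hall⟩
    rw [hbig] at hple
    refine ⟨p % r.length, List.mem_range.mpr (Nat.mod_lt _ hn'), ?_⟩
    rw [hinner _]
    intro k hk
    rw [Nat.mod_add_mod, ← pv_flatten_replicate_getElem? r (t.length / r.length + 2) (p + k) (by omega)]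
    exact hall k hk

-- ===== VERDICT (by name: the statement is the Claim_ definition above) =====
theorem is_include_spec : Claim_equal_is_include := by
  intro ring target _
  unfold Spec_is_include is_include is_include_alt
  by_cases hr : ring.toList = []
  · simp [hr]
  · rw [if_neg (by simpa using hr)]
    rw [PySem.List.pyRepeat,
      show PySem.Int.floordiv (target.toList.length : Int) (ring.toList.length : Int) + 2
        = ((target.toList.length / ring.toList.length + 2 : Nat) : Int) by
          rw [PySem.Int.floordiv_natCast]; push_cast; ring]
    rw [Int.toNat_natCast]
    exact pv_main ring.toList target.toList hr
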